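-- pv_equiv track=rewrite | github.com/rellarusty/kmc-assRep-1 | assreportl1.py | entrance_function
-- ===== SOURCE A (Python) =====
-- def entrance_function(queue_list):
--   entry_list = []
--   denied_list = []
--
--   ordered_queue = sorted(queue_list, reverse = True)
--
--   for each in ordered_queue:
--     if each == 90:
--       denied_list.append(each)
--     elif each >= 18:
--       entry_list.append(each)
--     else:
--       denied_list.append(each)
--
--   return(entry_list, denied_list)
-- ===== SOURCE B (Python) =====
-- def entrance_function(queue_list):
--   entry_list = sorted([x for x in queue_list if x >= 18 and x != 90], reverse=True)
--   denied_list = sorted([x for x in queue_list if x < 18 or x == 90], reverse=True)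
--   return (entry_list, denied_list)
-- ===== Notes on version B (the rewrite author's own statement) =====
-- stated objective: simpler
-- what changed: Replaces the single sort followed by a classification loop with two filter comprehensions and two independent descending sorts; no loop with mutable accumulators remains.
import Mathlib
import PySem

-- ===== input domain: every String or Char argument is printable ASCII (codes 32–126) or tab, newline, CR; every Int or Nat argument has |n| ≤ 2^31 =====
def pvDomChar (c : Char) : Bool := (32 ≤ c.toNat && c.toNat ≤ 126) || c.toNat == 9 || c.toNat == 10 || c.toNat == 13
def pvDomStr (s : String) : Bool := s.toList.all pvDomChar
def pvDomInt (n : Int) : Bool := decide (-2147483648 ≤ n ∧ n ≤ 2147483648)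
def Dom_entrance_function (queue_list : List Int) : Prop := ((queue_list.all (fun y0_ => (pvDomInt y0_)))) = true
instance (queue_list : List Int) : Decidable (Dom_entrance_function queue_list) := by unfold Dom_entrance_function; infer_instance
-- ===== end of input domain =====

-- B replaces A's sort-then-classify loop with two filters each followed by its own descending sort (objective: simpler).

-- ===== PORT A =====
-- sort descending, then one pass appending each element to entry or denied per the branch order of A
def entrance_function (queue_list : List Int) : List Int × List Int :=
  let ordered_queue := PySem.List.sorted queue_list (fun x => x) true
  ordered_queue.foldl
    (fun (st : List Int × List Int) each =>
      if each == 90 then (st.1, st.2 ++ [each])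
      else if each ≥ 18 then (st.1 ++ [each], st.2)
      else (st.1, st.2 ++ [each]))
    ([], [])

-- ===== PORT B =====
-- two filters, two independent descending sorts
def entrance_function_alt (queue_list : List Int) : List Int × List Int :=
  (PySem.List.sorted (queue_list.filter (fun x => x ≥ 18 && x ≠ 90)) (fun x => x) true,
   PySem.List.sorted (queue_list.filter (fun x => x < 18 || x == 90)) (fun x => x) true)

-- ===== PRECONDITION & SPEC =====
def Spec_entrance_function (queue_list : List Int) (out : List Int × List Int) : Prop := out = entrance_function_alt queue_list
instance (queue_list : List Int) (out : List Int × List Int) : Decidable (Spec_entrance_function queue_list out) := by unfold Spec_entrance_function; infer_instance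

-- ===== CLAIM (what is proved, stated in full; the proofs are below) =====
def Claim_equal_entrance_function : Prop := ∀ (queue_list : List Int), Dom_entrance_function queue_list → Spec_entrance_function queue_list (entrance_function queue_list)

-- ===== LEMMAS AND PROOFS =====

-- A's classification loop produces the two filters of the list it traverses
theorem pv_fold_filter (l e d : List Int) :
    l.foldl
      (fun (st : List Int × List Int) each =>
        if each == 90 then (st.1, st.2 ++ [each])
        else if each ≥ 18 then (st.1 ++ [each], st.2)
        else (st.1, st.2 ++ [each]))
      (e, d)
    = (e ++ l.filter (fun x => x ≥ 18 && x ≠ 90), d ++ l.filter (fun x => x < 18 || x == 90)) := by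
  induction l generalizing e d with
  | nil => simp
  | cons a t ih =>
    by_cases h90 : a = 90
    · subst h90; simp only [List.foldl_cons, beq_self_eq_true, if_true]
      rw [ih]; simp
    · by_cases h18 : (18 : Int) ≤ a
      · have hnl : ¬ a < 18 := not_lt.mpr h18
        simp only [List.foldl_cons]
        rw [if_neg (by simp [h90]), if_pos h18, ih]
        simp [h90, h18, hnl]
      · have hlt : a < 18 := lt_of_not_ge h18
        simp only [List.foldl_cons]
        rw [if_neg (by simp [h90]), if_neg h18, ih]
        simp [h90, h18, hlt]

-- filtering a descending-sorted list equals sorting the filtered list descending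
theorem pv_filter_sorted (xs : List Int) (p : Int → Bool) :
    (PySem.List.sorted xs (fun x => x) true).filter p
      = PySem.List.sorted (xs.filter p) (fun x => x) true := by
  refine List.Perm.eq_of_pairwise (le := fun a b : Int => b ≤ a)
    (fun a b _ _ h1 h2 => le_antisymm h2 h1)
    (List.Pairwise.filter p (PySem.List.sorted_pairwise_rev xs (fun x => x)))
    (PySem.List.sorted_pairwise_rev (xs.filter p) (fun x => x))
    ((List.Perm.filter p (PySem.List.sorted_perm xs (fun x => x) true)).trans
      (PySem.List.sorted_perm (xs.filter p) (fun x => x) true).symm)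

-- ===== VERDICT (by name: the statement is the Claim_ definition above) =====
theorem entrance_function_spec : Claim_equal_entrance_function := by
  intro qs _
  show entrance_function qs = entrance_function_alt qs
  unfold entrance_function entrance_function_alt
  rw [pv_fold_filter, pv_filter_sorted, pv_filter_sorted]
  simp
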